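-- pv_equiv track=rewrite | github.com/HuaZao/ZFJObsLibSource | addRubbishCode.py | getSpaceCount
-- ===== SOURCE A (Python) =====
-- def getSpaceCount(line):
--     count = 0
--     line_list = line.split(' ')
--     for item in line_list:
--         if len(item) == 0:
--             count += 1
--         else:
--             count += 1
--             break
--
--     if line.split('\n')[0].endswith('{'):
--         count += 4
--     return count - 1
-- ===== SOURCE B (Python) =====
-- def getSpaceCount(line):
--     count = len(line) - len(line.lstrip(' '))
--     if line.split('\n')[0].endswith('{'):
--         count += 4
--     return count
-- ===== Notes on version B (the rewrite author's own statement) =====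
-- stated objective: simpler
-- what changed: Replaces the split-on-space token loop (count empty tokens, break at the first non-empty, subtract 1) by the closed form: length of the line minus the length of the line with its leading spaces stripped, keeping the same brace adjustment.
import Mathlib
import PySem

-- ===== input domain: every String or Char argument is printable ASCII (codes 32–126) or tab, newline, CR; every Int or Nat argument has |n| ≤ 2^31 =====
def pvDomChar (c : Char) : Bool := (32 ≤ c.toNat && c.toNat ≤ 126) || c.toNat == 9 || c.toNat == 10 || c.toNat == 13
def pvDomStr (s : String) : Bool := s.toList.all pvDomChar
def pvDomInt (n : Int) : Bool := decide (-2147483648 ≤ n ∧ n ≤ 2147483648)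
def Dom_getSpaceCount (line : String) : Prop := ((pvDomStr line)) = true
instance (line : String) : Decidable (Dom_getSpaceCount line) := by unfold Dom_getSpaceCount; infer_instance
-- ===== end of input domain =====

-- B replaces A's split-on-space token loop by the closed form len(line) - len(line.lstrip(' ')) (simpler; same brace adjustment).

-- ===== PORT A =====
-- A's for-loop with break: +1 per empty token, then +1 and stop at the first non-empty token.
def pvLoopA : List (List Char) → Int
  | [] => 0
  | item :: rest => if PySem.Chars.len item = 0 then 1 + pvLoopA rest else 1

def getSpaceCount (line : String) : Int :=
  -- line.split(' ') / line.split('\n') → PySem.Chars.splitOn (the sep ≠ "" form of str.split).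
  -- [0] is modelled by headD [] — str.split always returns a non-empty list, so Python never raises here.
  let lineList := PySem.Chars.splitOn line.toList [' ']
  let count := pvLoopA lineList
  let count := if PySem.Chars.endswith ((PySem.Chars.splitOn line.toList ['\n']).headD []) ['{'] then count + 4 else count
  count - 1

-- ===== PORT B =====
def getSpaceCount_alt (line : String) : Int :=
  -- len(line) - len(line.lstrip(' ')): lstrip(' ') removes exactly the leading ' ' characters,
  -- i.e. List.dropWhile (· == ' ') on the code points (exact; PySem has no chars-argument lstrip).
  let count : Int := PySem.Chars.len line.toList - PySem.Chars.len (line.toList.dropWhile (· == ' '))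
  if PySem.Chars.endswith ((PySem.Chars.splitOn line.toList ['\n']).headD []) ['{'] then count + 4 else count

-- ===== PRECONDITION & SPEC =====
def Spec_getSpaceCount (line : String) (out : Int) : Prop := out = getSpaceCount_alt line
instance (line : String) (out : Int) : Decidable (Spec_getSpaceCount line out) := by unfold Spec_getSpaceCount; infer_instance

-- ===== CLAIM (what is proved, stated in full; the proofs are below) =====
def Claim_equal_getSpaceCount : Prop := ∀ (line : String), Dom_getSpaceCount line → Spec_getSpaceCount line (getSpaceCount line)

-- ===== LEMMAS AND PROOFS =====

-- Structural model of splitOn with the single-character separator ' ' (cur = reversed current token).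
def pvSplit : List Char → List Char → List (List Char)
  | cur, [] => [cur.reverse]
  | cur, d :: rest => if d = ' ' then cur.reverse :: pvSplit [] rest else pvSplit (d :: cur) rest

theorem pv_go_eq (fuel : Nat) : ∀ (cs cur : List Char) (acc : List (List Char)),
    cs.length < fuel →
    PySem.Chars.splitOn.go [' '] fuel cs cur acc = acc.reverse ++ pvSplit cur cs := by
  induction fuel with
  | zero => intro cs cur acc h; omega
  | succ n ih =>
    intro cs cur acc h
    cases cs with
    | nil => simp [PySem.Chars.splitOn.go, pvSplit]
    | cons d rest =>
      by_cases hd : d = ' '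
      · subst hd
        rw [show PySem.Chars.splitOn.go [' '] (n+1) (' ' :: rest) cur acc
              = PySem.Chars.splitOn.go [' '] n rest [] (cur.reverse :: acc) by
            simp [PySem.Chars.splitOn.go, List.isPrefixOf]]
        rw [ih rest [] (cur.reverse :: acc) (by simpa using Nat.lt_of_succ_lt_succ h)]
        simp [pvSplit]
      · rw [show PySem.Chars.splitOn.go [' '] (n+1) (d :: rest) cur acc
              = PySem.Chars.splitOn.go [' '] n rest (d :: cur) acc by
            simp [PySem.Chars.splitOn.go, List.isPrefixOf, Ne.symm hd]]
        rw [ih rest (d :: cur) acc (by simpa using Nat.lt_of_succ_lt_succ h)]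
        simp [pvSplit, hd]

theorem pv_splitOn_space (cs : List Char) :
    PySem.Chars.splitOn cs [' '] = pvSplit [] cs := by
  have := pv_go_eq (cs.length + 1) cs [] [] (by omega)
  simpa [PySem.Chars.splitOn] using this

theorem pv_loopA_ne (cs : List Char) : ∀ (cur : List Char), cur ≠ [] →
    pvLoopA (pvSplit cur cs) = 1 := by
  induction cs with
  | nil => intro cur hc; simp [pvSplit, pvLoopA, List.length_eq_zero_iff, hc]
  | cons d rest ih =>
    intro cur hc
    by_cases hd : d = ' '
    · simp [pvSplit, hd, pvLoopA, List.length_eq_zero_iff, hc]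
    · simp only [pvSplit, if_neg hd]
      exact ih (d :: cur) (by simp)

theorem pv_loopA_split (cs : List Char) :
    pvLoopA (pvSplit [] cs) = ((cs.takeWhile (· == ' ')).length : Int) + 1 := by
  induction cs with
  | nil => simp [pvSplit, pvLoopA]
  | cons d rest ih =>
    by_cases hd : d = ' '
    · simp [pvSplit, hd, pvLoopA, ih]; ring
    · simp [pvSplit, hd, pv_loopA_ne rest [d] (by simp)]

theorem pv_take_drop (cs : List Char) :
    (cs.length : Int) - ((cs.dropWhile (· == ' ')).length : Int)
      = ((cs.takeWhile (· == ' ')).length : Int) := by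
  have h := congrArg List.length (List.takeWhile_append_dropWhile (p := (· == ' ')) (l := cs))
  rw [List.length_append] at h
  omega

-- ===== VERDICT (by name: the statement is the Claim_ definition above) =====
theorem getSpaceCount_spec : Claim_equal_getSpaceCount := by
  intro line _
  unfold Spec_getSpaceCount getSpaceCount getSpaceCount_alt
  simp only [pv_splitOn_space, pv_loopA_split, PySem.Chars.len_eq]
  rw [pv_take_drop]
  split_ifs <;> ring
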